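-- pv_equiv track=rewrite | github.com/ducklin404/chess_engine | compute_helper.py | precompute_knight_attacks
-- ===== SOURCE A (Python) =====
-- def precompute_knight_attacks(position):
--     row = position // 8
--     col = position % 8
--     mask = 0
--     for i in range(-2, 3):
--         if i == 2 or i == -2:
--             for j in (1, -1):
--                 if 0 <= row + i < 8 and 0 <= col + j < 8:
--                     mask |= 1 << (row + i) * 8 + (col + j)
--         elif i == 1 or i == -1:
--             for j in (2, -2):
--                 if 0 <= row + i < 8 and 0 <= col + j < 8:
--                     mask |= 1 << (row + i) * 8 + (col + j)
--     return mask
-- ===== SOURCE B (Python) =====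
-- def precompute_knight_attacks(position):
--     row, col = divmod(position, 8)
--     n = 1 << col
--     near = ((n << 1) | (n >> 1)) & 0xFF   # files col±1, wrap-free within one rank byte
--     far = ((n << 2) | (n >> 2)) & 0xFF    # files col±2
--     mask = 0
--     for dr, pat in ((-2, near), (-1, far), (1, far), (2, near)):
--         r = row + dr
--         if 0 <= r < 8:
--             mask |= pat << (8 * r)
--     return mask
-- ===== Notes on version B (the rewrite author's own statement) =====
-- stated objective: alternative
-- what changed: Replaces the nested per-square offset loops and per-move bounds checks with rank-pattern bit manipulation: a one-byte file pattern (col±1, col±2) is built once by shifts and masked to one byte, then OR-ed into the four valid ranks.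
import Mathlib
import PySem

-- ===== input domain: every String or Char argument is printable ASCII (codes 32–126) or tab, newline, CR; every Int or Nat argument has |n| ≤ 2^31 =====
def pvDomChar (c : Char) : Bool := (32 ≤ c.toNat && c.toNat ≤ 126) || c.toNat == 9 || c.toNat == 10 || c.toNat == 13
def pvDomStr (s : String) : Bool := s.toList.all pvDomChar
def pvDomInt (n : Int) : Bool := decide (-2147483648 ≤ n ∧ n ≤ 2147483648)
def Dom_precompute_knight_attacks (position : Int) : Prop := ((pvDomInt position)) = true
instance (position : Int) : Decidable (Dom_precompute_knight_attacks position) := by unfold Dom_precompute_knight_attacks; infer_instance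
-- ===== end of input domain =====

-- B replaces A's nested offset loops and per-move bound checks by rank-pattern bit manipulation
-- (one single-byte file pattern per move width, OR-ed into the valid ranks); objective: alternative.

-- ===== PORT A =====
-- the body of A's outer loop, over the already-computed row/col (mask accumulated left to right)
def pvABody (row col mask i : Int) : Int :=
    if i = 2 ∨ i = -2 then
      ([(1 : Int), -1]).foldl (fun mask j =>
        if 0 ≤ row + i ∧ row + i < 8 ∧ 0 ≤ col + j ∧ col + j < 8 then
          -- 1 << e with e = (row+i)*8+(col+j); guarded, so 0 ≤ e ≤ 63 and .toNat is exact
          PySem.Int.bor mask ((1 : Int) <<< ((row + i) * 8 + (col + j)).toNat)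
        else mask) mask
    else if i = 1 ∨ i = -1 then
      ([(2 : Int), -2]).foldl (fun mask j =>
        if 0 ≤ row + i ∧ row + i < 8 ∧ 0 ≤ col + j ∧ col + j < 8 then
          PySem.Int.bor mask ((1 : Int) <<< ((row + i) * 8 + (col + j)).toNat)
        else mask) mask
    else mask

def pvALoop (row col : Int) : Int :=
  (PySem.List.pyRange (-2) 3 1).foldl (pvABody row col) 0

def precompute_knight_attacks (position : Int) : Int :=
  let row := PySem.Int.floordiv position 8
  let col := PySem.Int.mod position 8
  pvALoop row col

-- ===== PORT B =====
-- B's rank-placement loop: OR each byte pattern into rank row+dr when that rank is on the board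
def pvBLoop (row : Int) (pats : List (Int × Int)) : Int :=
  pats.foldl (fun mask pr =>
    let r := row + pr.1
    -- pat << 8*r: guarded, so 0 ≤ 8*r ≤ 56 and .toNat is exact
    if 0 ≤ r ∧ r < 8 then PySem.Int.bor mask ((pr.2 : Int) <<< (8 * r).toNat) else mask) 0

def precompute_knight_attacks_alt (position : Int) : Int :=
  let row := PySem.Int.floordiv position 8
  let col := PySem.Int.mod position 8
  -- n = 1 << col; col = position % 8 ∈ [0,8), so .toNat is exact
  let n : Int := (1 : Int) <<< col.toNat
  let near := PySem.Int.band (PySem.Int.bor (n <<< (1 : Nat)) (n >>> (1 : Nat))) 255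
  let far  := PySem.Int.band (PySem.Int.bor (n <<< (2 : Nat)) (n >>> (2 : Nat))) 255
  pvBLoop row [(-2, near), (-1, far), (1, far), (2, near)]

-- ===== PRECONDITION & SPEC =====
def Spec_precompute_knight_attacks (position : Int) (out : Int) : Prop := out = precompute_knight_attacks_alt position
instance (position : Int) (out : Int) : Decidable (Spec_precompute_knight_attacks position out) := by unfold Spec_precompute_knight_attacks; infer_instance

-- ===== CLAIM (what is proved, stated in full; the proofs are below) =====
def Claim_equal_precompute_knight_attacks : Prop := ∀ (position : Int), Dom_precompute_knight_attacks position → Spec_precompute_knight_attacks position (precompute_knight_attacks position)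

-- ===== LEMMAS AND PROOFS =====

lemma pvRange_lit : PySem.List.pyRange (-2) 3 1 = [-2, -1, 0, 1, 2] := by decide

-- off the 12-rank band that can contribute, A's every bound check fails
lemma pvABody_id (row col mask i : Int) (h : row ≤ -3 ∨ 10 ≤ row) :
    pvABody row col mask i = mask := by
  unfold pvABody
  simp only [List.foldl]
  split_ifs <;> first | rfl | (exfalso; omega)

lemma pvALoop_zero (row col : Int) (h : row ≤ -3 ∨ 10 ≤ row) : pvALoop row col = 0 := by
  unfold pvALoop
  rw [pvRange_lit]
  simp only [List.foldl_cons, List.foldl_nil]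
  rw [pvABody_id row col 0 (-2) h,
      pvABody_id row col 0 (-1) h,
      pvABody_id row col 0 0 h,
      pvABody_id row col 0 1 h,
      pvABody_id row col 0 2 h]

-- same for B's rank placements
lemma pvBLoop_zero (row : Int) (a b c d : Int) (h : row ≤ -3 ∨ 10 ≤ row) :
    pvBLoop row [(-2, a), (-1, b), (1, c), (2, d)] = 0 := by
  unfold pvBLoop
  simp only [List.foldl_cons, List.foldl_nil]
  split_ifs <;> first | rfl | (exfalso; omega)

lemma pvCore_eq (row col : Int) (h0 : 0 ≤ col) (h8 : col < 8) :
    pvALoop row col =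
      pvBLoop row
        [(-2, PySem.Int.band (PySem.Int.bor (((1 : Int) <<< col.toNat) <<< (1 : Nat)) (((1 : Int) <<< col.toNat) >>> (1 : Nat))) 255),
         (-1, PySem.Int.band (PySem.Int.bor (((1 : Int) <<< col.toNat) <<< (2 : Nat)) (((1 : Int) <<< col.toNat) >>> (2 : Nat))) 255),
         (1,  PySem.Int.band (PySem.Int.bor (((1 : Int) <<< col.toNat) <<< (2 : Nat)) (((1 : Int) <<< col.toNat) >>> (2 : Nat))) 255),
         (2,  PySem.Int.band (PySem.Int.bor (((1 : Int) <<< col.toNat) <<< (1 : Nat)) (((1 : Int) <<< col.toNat) >>> (1 : Nat))) 255)] := by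
  by_cases hband : -2 ≤ row ∧ row ≤ 9
  · obtain ⟨h1, h2⟩ := hband
    interval_cases row <;> interval_cases col <;> decide
  · have h : row ≤ -3 ∨ 10 ≤ row := by omega
    rw [pvALoop_zero row col h, pvBLoop_zero row _ _ _ _ h]

-- ===== VERDICT (by name: the statement is the Claim_ definition above) =====
theorem precompute_knight_attacks_spec : Claim_equal_precompute_knight_attacks := by
  intro position _
  unfold Spec_precompute_knight_attacks precompute_knight_attacks precompute_knight_attacks_alt
  exact pvCore_eq _ _ (PySem.Int.mod_nonneg position (by norm_num)) (PySem.Int.mod_lt position (by norm_num))
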